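-- pv_equiv track=rewrite | github.com/colding10/cp-notebook | solutions/usaco-contest/USACO/2023 USACO Jan/BRONZE/q3.py | solve
-- ===== SOURCE A (Python) =====
-- def solve(ss):
--     l = len(ss)
--     if l < 3:  # too short
--         return -1
--     if ss == "MOO":  # already done
--         return 0
--     if ss.startswith("MOO") or ss.endswith("MOO"): # only need to remove
--         return l - 3
--     if "O" not in ss[1:-1]:  # impossible
--         return -1
--
--     best_cost = float('inf')
--
--     for target_o in range(1, l - 1): # try all 'o's to be in the center of our "moo"
--         if ss[target_o] != "O":
--             continue
--
--         cost = l - 3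
--         if ss[target_o - 1] != "M":
--             cost += 1
--         if ss[target_o + 1] != "O":
--             cost += 1
--
--         best_cost = min(best_cost, cost)
--
--     return best_cost
-- ===== SOURCE B (Python) =====
-- def solve(ss):
--     l = len(ss)
--     if l < 3:
--         return -1
--     if "MOO" in ss:
--         return l - 3          # keep one O of some MOO as the center (0 when ss == "MOO")
--     if "O" not in ss[1:-1]:
--         return -1
--     # penalty 1: an interior O with 'M' to its left ("MO" whose O is not last)
--     # or with 'O' to its right ("OO" whose first O is not first)
--     if "MO" in ss[:-1] or "OO" in ss[1:]:
--         return l - 2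
--     return l - 1
-- ===== Notes on version B (the rewrite author's own statement) =====
-- stated objective: simpler
-- what changed: Replaces the explicit min-scan over all interior centers (with per-center penalty computation) by three constant-size substring membership tests on bounded slices deciding the penalty class directly.
import Mathlib
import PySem

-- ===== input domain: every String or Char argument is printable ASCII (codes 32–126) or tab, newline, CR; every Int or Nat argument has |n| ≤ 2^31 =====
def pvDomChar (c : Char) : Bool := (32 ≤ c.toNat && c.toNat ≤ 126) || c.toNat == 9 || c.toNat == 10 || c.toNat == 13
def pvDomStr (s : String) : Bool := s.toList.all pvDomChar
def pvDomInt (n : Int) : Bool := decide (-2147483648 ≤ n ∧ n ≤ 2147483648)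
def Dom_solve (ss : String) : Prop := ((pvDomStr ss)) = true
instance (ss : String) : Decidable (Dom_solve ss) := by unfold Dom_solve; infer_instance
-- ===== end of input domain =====

-- B replaces A's min-scan over interior centers by three substring membership tests on bounded slices.


-- ===== PORT A =====
-- float('inf') is modelled as `none` (Option Int); the Python returns it only when the loop
-- found no interior 'O', which the previous branch excludes, so `.getD (-1)` is unreachable.
def solve (ss : String) : Int :=
  let l : Int := PySem.Str.len ss
  if l < 3 then -1
  else if ss = "MOO" then 0
  else if PySem.Str.startswith ss "MOO" || PySem.Str.endswith ss "MOO" then l - 3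
  else if !(PySem.Str.isIn "O" (PySem.Str.slice ss (some 1) (some (-1)))) then -1
  else
    let best : Option Int :=
      (PySem.List.pyRange 1 (l - 1)).foldl (fun best t =>
        if PySem.List.pyGetD ss.toList t ' ' ≠ 'O' then best
        else
          let cost := l - 3
          let cost := if PySem.List.pyGetD ss.toList (t - 1) ' ' ≠ 'M' then cost + 1 else cost
          let cost := if PySem.List.pyGetD ss.toList (t + 1) ' ' ≠ 'O' then cost + 1 else cost
          some (match best with | none => cost | some b => min b cost)) none
    best.getD (-1)

-- ===== PORT B =====
def solve_alt (ss : String) : Int :=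
  let l : Int := PySem.Str.len ss
  if l < 3 then -1
  else if PySem.Str.isIn "MOO" ss then l - 3
  else if !(PySem.Str.isIn "O" (PySem.Str.slice ss (some 1) (some (-1)))) then -1
  else if PySem.Str.isIn "MO" (PySem.Str.slice ss none (some (-1))) ||
          PySem.Str.isIn "OO" (PySem.Str.slice ss (some 1) none) then l - 2
  else l - 1

-- ===== PRECONDITION & SPEC =====
def Spec_solve (ss : String) (out : Int) : Prop := out = solve_alt ss
instance (ss : String) (out : Int) : Decidable (Spec_solve ss out) := by unfold Spec_solve; infer_instance

-- ===== CLAIM (what is proved, stated in full; the proofs are below) =====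
def Claim_equal_solve : Prop := ∀ (ss : String), Dom_solve ss → Spec_solve ss (solve ss)

-- ===== LEMMAS AND PROOFS =====

-- The cost A assigns to center t (the let-chain of the loop body, verbatim).
def costI (s : List Char) (l t : Int) : Int :=
  let cost := l - 3
  let cost := if PySem.List.pyGetD s (t - 1) ' ' ≠ 'M' then cost + 1 else cost
  if PySem.List.pyGetD s (t + 1) ' ' ≠ 'O' then cost + 1 else cost

-- The list of costs of all interior 'O' centers.
def Lc (s : List Char) : List Int :=
  ((PySem.List.pyRange 1 ((s.length : Int) - 1)).filter
      (fun t => decide (PySem.List.pyGetD s t ' ' = 'O'))).map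
    (fun t => costI s (s.length : Int) t)

lemma port_body_eq (s : List Char) (l : Int) (best : Option Int) (t : Int) :
    (if PySem.List.pyGetD s t ' ' ≠ 'O' then best
     else
       let cost := l - 3
       let cost := if PySem.List.pyGetD s (t - 1) ' ' ≠ 'M' then cost + 1 else cost
       let cost := if PySem.List.pyGetD s (t + 1) ' ' ≠ 'O' then cost + 1 else cost
       some (match best with | none => cost | some b => min b cost))
    = if PySem.List.pyGetD s t ' ' = 'O'
        then some (match best with | none => costI s l t | some b => min b (costI s l t))
        else best := by
  cases best <;> simp only [costI, ne_eq, ite_not]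

lemma foldl_min_filter_some (p : Int → Prop) [DecidablePred p] (f : Int → Int) :
    ∀ (ts : List Int) (x : Int),
      ts.foldl (fun best t => if p t
          then some (match best with | none => f t | some b => min b (f t))
          else best) (some x)
        = some (((ts.filter (fun t => decide (p t))).map f).foldl min x) := by
  intro ts
  induction ts with
  | nil => intro x; simp
  | cons t ts ih =>
    intro x
    by_cases h : p t <;> simp [h, ih]

lemma foldl_min_filter (p : Int → Prop) [DecidablePred p] (f : Int → Int) :
    ∀ (ts : List Int),
      ts.foldl (fun best t => if p t
          then some (match best with | none => f t | some b => min b (f t))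
          else best) none
        = ((ts.filter (fun t => decide (p t))).map f).min? := by
  intro ts
  induction ts with
  | nil => simp
  | cons t ts ih =>
    by_cases h : p t
    · rw [List.foldl_cons,
        show (if p t then some (match (none : Option Int) with
            | none => f t | some b => min b (f t)) else none) = some (f t) from by simp [h],
        foldl_min_filter_some p f ts (f t),
        List.filter_cons_of_pos (by simpa using h), List.map_cons, List.min?_cons']
    · simp [h, ih]

lemma port_loop_eq (s : List Char) :
    (PySem.List.pyRange 1 ((s.length : Int) - 1)).foldl
      (fun best t => if PySem.List.pyGetD s t ' ' = 'O'
          then some (match best with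
            | none => costI s (s.length : Int) t
            | some b => min b (costI s (s.length : Int) t))
          else best) none
    = (Lc s).min? :=
  foldl_min_filter _ _ _

-- index-wise views of the substring tests
def hasMOO (s : List Char) : Prop :=
  ∃ j : Nat, s[j]? = some 'M' ∧ s[j+1]? = some 'O' ∧ s[j+2]? = some 'O'
def hasMO (s : List Char) : Prop :=
  ∃ j : Nat, s[j]? = some 'M' ∧ s[j+1]? = some 'O' ∧ j + 2 < s.length
def hasOO (s : List Char) : Prop :=
  ∃ j : Nat, s[j+1]? = some 'O' ∧ s[j+2]? = some 'O'
def hasIntO (s : List Char) : Prop :=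
  ∃ k : Nat, 1 ≤ k ∧ k + 1 < s.length ∧ s[k]? = some 'O'

lemma prefix1 {a : Char} {l : List Char} : [a] <+: l ↔ l[0]? = some a := by
  cases l with
  | nil => simp
  | cons x r =>
    simp only [List.getElem?_cons_zero, Option.some.injEq]
    constructor
    · rintro ⟨rest, h⟩; simp at h; exact h.1.symm
    · rintro rfl; exact ⟨r, rfl⟩

lemma prefix2 {a b : Char} {l : List Char} :
    [a, b] <+: l ↔ l[0]? = some a ∧ l[1]? = some b := by
  match l with
  | [] => simp
  | [x] => simp [List.IsPrefix]
  | x :: y :: r =>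
    simp only [List.getElem?_cons_zero, List.getElem?_cons_succ, Option.some.injEq]
    constructor
    · rintro ⟨rest, h⟩; simp at h; exact ⟨h.1.symm, h.2.1.symm⟩
    · rintro ⟨rfl, rfl⟩; exact ⟨r, rfl⟩

lemma prefix3 {a b c : Char} {l : List Char} :
    [a, b, c] <+: l ↔ l[0]? = some a ∧ l[1]? = some b ∧ l[2]? = some c := by
  match l with
  | [] => simp
  | [x] => simp [List.IsPrefix]
  | [x, y] => simp [List.IsPrefix]
  | x :: y :: z :: r =>
    simp only [List.getElem?_cons_zero, List.getElem?_cons_succ, Option.some.injEq]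
    constructor
    · rintro ⟨rest, h⟩; simp at h; exact ⟨h.1.symm, h.2.1.symm, h.2.2.1.symm⟩
    · rintro ⟨rfl, rfl, rfl⟩; exact ⟨r, rfl⟩

lemma isIn_MOO_iff (ss : String) :
    PySem.Str.isIn "MOO" ss = true ↔ hasMOO ss.toList := by
  rw [PySem.Str.isIn_eq, ← PySem.Chars.exists_prefix_drop_iff_isIn]
  show (∃ j, ['M','O','O'] <+: List.drop j ss.toList) ↔ _
  unfold hasMOO
  simp [prefix3, List.getElem?_drop]

lemma dropLast_some {s : List Char} {i : Nat} {c : Char} :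
    s.dropLast[i]? = some c ↔ i < s.length - 1 ∧ s[i]? = some c := by
  rw [List.getElem?_dropLast]
  by_cases h : i < s.length - 1 <;> simp [h]

lemma take_some {s : List Char} {m i : Nat} {c : Char} :
    (List.take m s)[i]? = some c ↔ i < m ∧ s[i]? = some c := by
  rw [List.getElem?_take]
  by_cases h : i < m <;> simp [h]

lemma isIn_MO_dropLast_iff (ss : String) :
    PySem.Str.isIn "MO" (PySem.Str.slice ss none (some (-1))) = true ↔ hasMO ss.toList := by
  rw [PySem.Str.isIn_eq, ← PySem.Chars.exists_prefix_drop_iff_isIn,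
      PySem.Str.toList_slice, PySem.Chars.slice_eq_listSlice, PySem.List.slice_to_neg_one]
  show (∃ j, ['M','O'] <+: List.drop j ss.toList.dropLast) ↔ _
  unfold hasMO
  simp only [prefix2, List.getElem?_drop, dropLast_some]
  constructor
  · rintro ⟨j, ⟨hb1, h1⟩, hb2, h2⟩
    refine ⟨j, ?_, h2, by omega⟩
    rw [show j = j + 0 from by omega]
    exact h1
  · rintro ⟨j, h1, h2, h3⟩
    exact ⟨j, ⟨by omega, by rw [show j + 0 = j from by omega]; exact h1⟩, ⟨by omega, h2⟩⟩

lemma isIn_OO_tail_iff (ss : String) :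
    PySem.Str.isIn "OO" (PySem.Str.slice ss (some 1) none) = true ↔ hasOO ss.toList := by
  rw [PySem.Str.isIn_eq, ← PySem.Chars.exists_prefix_drop_iff_isIn,
      PySem.Str.toList_slice, PySem.Chars.slice_eq_listSlice, PySem.List.slice_from_one,
      ← List.drop_one]
  show (∃ j, ['O','O'] <+: List.drop j (List.drop 1 ss.toList)) ↔ _
  unfold hasOO
  simp only [prefix2, List.getElem?_drop]
  constructor
  · rintro ⟨j, h1, h2⟩
    refine ⟨j, ?_, ?_⟩
    · rw [show j + 1 = 1 + (j + 0) from by omega]; exact h1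
    · rw [show j + 2 = 1 + (j + 1) from by omega]; exact h2
  · rintro ⟨j, h1, h2⟩
    refine ⟨j, ?_, ?_⟩
    · rw [show 1 + (j + 0) = j + 1 from by omega]; exact h1
    · rw [show 1 + (j + 1) = j + 2 from by omega]; exact h2

lemma interior_slice (s : List Char) (h3 : 3 ≤ s.length) :
    PySem.List.slice s (some 1) (some (-1)) = List.take (s.length - 2) (List.drop 1 s) := by
  have h1 : PySem.List.clampIdx s.length 1 = 1 := by
    simp [PySem.List.clampIdx]; omega
  have h2 : PySem.List.clampIdx s.length (-1) = s.length - 1 := PySem.List.clampIdx_neg_one _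
  show List.take (PySem.List.clampIdx s.length (-1) - PySem.List.clampIdx s.length 1)
      (List.drop (PySem.List.clampIdx s.length 1) s) = _
  rw [h1, h2, show s.length - 1 - 1 = s.length - 2 from by omega]

lemma isIn_O_interior_iff (ss : String) (h3 : 3 ≤ ss.toList.length) :
    PySem.Str.isIn "O" (PySem.Str.slice ss (some 1) (some (-1))) = true ↔ hasIntO ss.toList := by
  rw [PySem.Str.isIn_eq, ← PySem.Chars.exists_prefix_drop_iff_isIn,
      PySem.Str.toList_slice, PySem.Chars.slice_eq_listSlice, interior_slice _ h3]
  show (∃ j, ['O'] <+: List.drop j (List.take (ss.toList.length - 2) (List.drop 1 ss.toList))) ↔ _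
  unfold hasIntO
  simp only [prefix1, List.getElem?_drop, take_some]
  constructor
  · rintro ⟨j, hb, h1⟩
    refine ⟨j + 1, by omega, by omega, ?_⟩
    rw [show j + 1 = 1 + (j + 0) from by omega]
    exact h1
  · rintro ⟨k, hk1, hk2, hk3⟩
    refine ⟨k - 1, by omega, ?_⟩
    rw [show 1 + (k - 1 + 0) = k from by omega]
    exact hk3

lemma pyGetD_char (s : List Char) (k : Nat) (hk : k < s.length) (c : Char) :
    PySem.List.pyGetD s (k : Int) ' ' = c ↔ s[k]? = some c := by
  rw [PySem.List.pyGetD_natCast]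
  rw [List.getD_eq_getElem?_getD, List.getElem?_eq_getElem hk]
  simp

lemma costI_cases (s : List Char) (k : Nat) (h1 : 1 ≤ k) (h2 : k + 1 < s.length) :
    costI s (s.length : Int) (k : Int)
      = ((s.length : Int) - 3) + (if s[k-1]? = some 'M' then 0 else 1)
        + (if s[k+1]? = some 'O' then 0 else 1) := by
  have e1 : (k : Int) - 1 = ((k - 1 : Nat) : Int) := by omega
  have e2 : (k : Int) + 1 = ((k + 1 : Nat) : Int) := by omega
  have hk1 : k - 1 < s.length := by omega
  have hA' := pyGetD_char s (k - 1) hk1 'M'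
  have hB' := pyGetD_char s (k + 1) h2 'O'
  simp only [costI]
  rw [e1, e2]
  by_cases hA : s[k-1]? = some 'M' <;> by_cases hB : s[k+1]? = some 'O'
  · rw [if_neg (not_not_intro (hA'.mpr hA)), if_neg (not_not_intro (hB'.mpr hB)),
        if_pos hA, if_pos hB]
    try omega
  · rw [if_neg (not_not_intro (hA'.mpr hA)), if_pos (fun h => hB (hB'.mp h)),
        if_pos hA, if_neg hB]
    try omega
  · rw [if_pos (fun h => hA (hA'.mp h)), if_neg (not_not_intro (hB'.mpr hB)),
        if_neg hA, if_pos hB]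
    try omega
  · rw [if_pos (fun h => hA (hA'.mp h)), if_pos (fun h => hB (hB'.mp h)),
        if_neg hA, if_neg hB]
    try omega

lemma mem_Lc_iff (s : List Char) (x : Int) :
    x ∈ Lc s ↔ ∃ k : Nat, (1 ≤ k ∧ k + 1 < s.length ∧ s[k]? = some 'O')
        ∧ x = costI s (s.length : Int) (k : Int) := by
  unfold Lc
  simp only [List.mem_map, List.mem_filter, PySem.List.mem_pyRange_one, decide_eq_true_eq]
  constructor
  · rintro ⟨t, ⟨⟨ht1, ht2⟩, hp⟩, rfl⟩
    have h0 : (0:Int) ≤ t := by omega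
    have hcast : ((t.toNat : Nat) : Int) = t := Int.toNat_of_nonneg h0
    refine ⟨t.toNat, ⟨by omega, by omega, ?_⟩, by rw [hcast]⟩
    rw [← pyGetD_char s t.toNat (by omega) 'O', hcast]
    exact hp
  · rintro ⟨k, ⟨hk1, hk2, hk3⟩, rfl⟩
    exact ⟨(k : Int), ⟨⟨by omega, by omega⟩,
      (pyGetD_char s k (by omega) 'O').mpr hk3⟩, rfl⟩

lemma getElem?_bound {s : List Char} {i : Nat} {c : Char} (h : s[i]? = some c) :
    i < s.length := by
  by_contra hc
  rw [List.getElem?_eq_none (by omega)] at h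
  exact absurd h (by simp)

-- every interior cost is ≥ len-3, with equality exactly at a full "MOO"
lemma cost_lower (s : List Char) {x : Int} (hx : x ∈ Lc s) (hm : ¬ hasMOO s) :
    ((s.length : Int)) - 2 ≤ x := by
  obtain ⟨k, ⟨hk1, hk2, hk3⟩, rfl⟩ := (mem_Lc_iff s x).mp hx
  rw [costI_cases s k hk1 hk2]
  by_cases hA : s[k-1]? = some 'M'
  · by_cases hB : s[k+1]? = some 'O'
    · exfalso
      refine hm ⟨k - 1, hA, ?_, ?_⟩
      · rw [show k - 1 + 1 = k from by omega]; exact hk3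
      · rw [show k - 1 + 2 = k + 1 from by omega]; exact hB
    · rw [if_pos hA, if_neg hB]; omega
  · rw [if_neg hA]; split_ifs <;> omega

lemma S1 (s : List Char) (h : hasMOO s) : (Lc s).min? = some ((s.length : Int) - 3) := by
  obtain ⟨j, hj1, hj2, hj3⟩ := h
  have hb : j + 2 < s.length := getElem?_bound hj3
  rw [List.min?_eq_some_iff]
  constructor
  · rw [mem_Lc_iff]
    refine ⟨j + 1, ⟨by omega, by omega, hj2⟩, ?_⟩
    rw [costI_cases s (j+1) (by omega) (by omega)]
    simp only [Nat.add_sub_cancel]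
    rw [if_pos hj1, if_pos (by simpa [Nat.add_assoc] using hj3)]
    ring
  · intro b hb'
    obtain ⟨k, ⟨hk1, hk2, hk3⟩, rfl⟩ := (mem_Lc_iff s b).mp hb'
    rw [costI_cases s k hk1 hk2]
    split_ifs <;> omega

lemma S2 (s : List Char) (hm : ¬ hasMOO s) (h : hasMO s ∨ hasOO s) :
    (Lc s).min? = some ((s.length : Int) - 2) := by
  rw [List.min?_eq_some_iff]
  refine ⟨?_, fun b hb' => cost_lower s hb' hm⟩
  rw [mem_Lc_iff]
  rcases h with ⟨j, hj1, hj2, hj3⟩ | ⟨j, hj1, hj2⟩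
  · -- "MO" with interior O center at j+1
    refine ⟨j + 1, ⟨by omega, by omega, hj2⟩, ?_⟩
    rw [costI_cases s (j+1) (by omega) (by omega)]
    simp only [Nat.add_sub_cancel]
    rw [if_pos hj1, if_neg (fun hB => hm ⟨j, hj1, hj2, by simpa [Nat.add_assoc] using hB⟩)]
    ring
  · -- "OO" with interior O center at j+1
    have hb : j + 2 < s.length := getElem?_bound hj2
    refine ⟨j + 1, ⟨by omega, by omega, hj1⟩, ?_⟩
    rw [costI_cases s (j+1) (by omega) (by omega)]
    simp only [Nat.add_sub_cancel]
    rw [if_neg (fun hA => hm ⟨j, hA, hj1, hj2⟩),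
        if_pos (by simpa [Nat.add_assoc] using hj2)]
    ring

lemma S3 (s : List Char) (hmo : ¬ hasMO s) (hoo : ¬ hasOO s)
    (hio : hasIntO s) : (Lc s).min? = some ((s.length : Int) - 1) := by
  have hall : ∀ x ∈ Lc s, x = (s.length : Int) - 1 := by
    intro x hx
    obtain ⟨k, ⟨hk1, hk2, hk3⟩, rfl⟩ := (mem_Lc_iff s x).mp hx
    rw [costI_cases s k hk1 hk2]
    have hA : ¬ s[k-1]? = some 'M' := fun hA => hmo ⟨k - 1, hA,
      by rw [show k - 1 + 1 = k from by omega]; exact hk3, by omega⟩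
    have hB : ¬ s[k+1]? = some 'O' := fun hB => hoo ⟨k - 1,
      by rw [show k - 1 + 1 = k from by omega]; exact hk3,
      by rw [show k - 1 + 2 = k + 1 from by omega]; exact hB⟩
    rw [if_neg hA, if_neg hB]; ring
  obtain ⟨k, hk1, hk2, hk3⟩ := hio
  have hmem : costI s (s.length : Int) (k : Int) ∈ Lc s :=
    (mem_Lc_iff s _).mpr ⟨k, ⟨hk1, hk2, hk3⟩, rfl⟩
  rw [List.min?_eq_some_iff]
  exact ⟨(hall _ hmem) ▸ hmem, fun b hb => le_of_eq (hall b hb).symm⟩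

lemma hasIntO_of_hasMOO {s : List Char} (h : hasMOO s) : hasIntO s := by
  obtain ⟨j, hj1, hj2, hj3⟩ := h
  exact ⟨j + 1, by omega, by have := getElem?_bound hj3; omega, hj2⟩

lemma solve_eq_alt (ss : String) : solve ss = solve_alt ss := by
  by_cases heq : ss = "MOO"
  · subst heq; decide
  unfold solve solve_alt
  simp only [PySem.Str.len_eq, port_body_eq, port_loop_eq]
  by_cases h3 : ((ss.toList.length : Int)) < 3
  · rw [if_pos h3, if_pos h3]
  have h3' : 3 ≤ ss.toList.length := by omega
  rw [if_neg h3, if_neg h3, if_neg heq]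
  by_cases hm : PySem.Str.isIn "MOO" ss = true
  · -- B returns len-3; A does so on every branch
    rw [if_pos hm]
    have hmoo : hasMOO ss.toList := (isIn_MOO_iff ss).mp hm
    by_cases hse : (PySem.Str.startswith ss "MOO" || PySem.Str.endswith ss "MOO") = true
    · rw [if_pos hse]
    · rw [if_neg hse]
      have hint : PySem.Str.isIn "O" (PySem.Str.slice ss (some 1) (some (-1))) = true :=
        (isIn_O_interior_iff ss h3').mpr (hasIntO_of_hasMOO hmoo)
      rw [hint]
      show (Lc ss.toList).min?.getD (-1) = _
      rw [S1 _ hmoo]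
      rfl
  · rw [if_neg hm]
    have hmoo : ¬ hasMOO ss.toList := fun h => hm ((isIn_MOO_iff ss).mpr h)
    have hstart : ¬ (PySem.Str.startswith ss "MOO" || PySem.Str.endswith ss "MOO") = true := by
      intro h
      rcases Bool.or_eq_true_iff.mp h with h' | h'
      · rw [PySem.Str.startswith_eq] at h'
        have hp := (PySem.Chars.startswith_iff _ _).mp h'
        exact hm (by rw [PySem.Str.isIn_eq, PySem.Chars.isIn_iff_infix]
                     exact hp.isInfix)
      · rw [PySem.Str.endswith_eq] at h'
        have hp := (PySem.Chars.endswith_iff _ _).mp h'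
        exact hm (by rw [PySem.Str.isIn_eq, PySem.Chars.isIn_iff_infix]
                     exact hp.isInfix)
    rw [if_neg hstart]
    by_cases hint : PySem.Str.isIn "O" (PySem.Str.slice ss (some 1) (some (-1))) = true
    · rw [hint]
      show (Lc ss.toList).min?.getD (-1) = _
      have hio : hasIntO ss.toList := (isIn_O_interior_iff ss h3').mp hint
      by_cases hpair : (PySem.Str.isIn "MO" (PySem.Str.slice ss none (some (-1))) ||
          PySem.Str.isIn "OO" (PySem.Str.slice ss (some 1) none)) = true
      · rw [if_pos hpair]
        have h2 : hasMO ss.toList ∨ hasOO ss.toList := by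
          rcases Bool.or_eq_true_iff.mp hpair with h' | h'
          · exact Or.inl ((isIn_MO_dropLast_iff ss).mp h')
          · exact Or.inr ((isIn_OO_tail_iff ss).mp h')
        rw [S2 _ hmoo h2]
        rfl
      · rw [if_neg hpair]
        have hmo : ¬ hasMO ss.toList := fun h => hpair (by
          rw [Bool.or_eq_true_iff]; exact Or.inl ((isIn_MO_dropLast_iff ss).mpr h))
        have hoo : ¬ hasOO ss.toList := fun h => hpair (by
          rw [Bool.or_eq_true_iff]; exact Or.inr ((isIn_OO_tail_iff ss).mpr h))
        rw [S3 _ hmo hoo hio]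
        rfl
    · have hint' : PySem.Str.isIn "O" (PySem.Str.slice ss (some 1) (some (-1))) = false :=
        Bool.eq_false_iff.mpr hint
      rw [hint']
      rfl

-- ===== VERDICT (by name: the statement is the Claim_ definition above) =====
theorem solve_spec : Claim_equal_solve := by
  intro ss _
  unfold Spec_solve
  exact solve_eq_alt ss
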